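-- pv_equiv track=rewrite | github.com/CodeBlackwell/Agent_Blackwell | Flagship/workflows/tdd_orchestrator/enhanced_agent_coordinator.py | _parse_multi_file_output
-- ===== SOURCE A (Python) =====
-- from typing import Dict, Any, List, Callable, Optional, Union
--
-- def _parse_multi_file_output(output: str) -> Dict[str, str]:
--     """Parse multi-file output from agent"""
--     files = {}
--     current_file = None
--     current_content = []
--
--     for line in output.split('\n'):
--         if line.startswith("FILE:"):
--             # Save previous file
--             if current_file:
--                 files[current_file] = '\n'.join(current_content)
--
--             # Start new file
--             current_file = line[5:].strip()
--             current_content = []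
--         else:
--             current_content.append(line)
--
--     # Save last file
--     if current_file:
--         files[current_file] = '\n'.join(current_content)
--
--     return files
-- ===== SOURCE B (Python) =====
-- def _parse_multi_file_output(output: str):
--     """Segment-based parse: locate each FILE: marker, take the block of lines
--     up to the next marker as that file's content."""
--     lines = output.split('\n')
--     n = len(lines)
--     files = {}
--     i = 0
--     # lines before the first marker are discarded
--     while i < n and not lines[i].startswith("FILE:"):
--         i += 1
--     while i < n:
--         name = lines[i][5:].strip()
--         j = i + 1
--         while j < n and not lines[j].startswith("FILE:"):
--             j += 1
--         if name:
--             files[name] = '\n'.join(lines[i + 1:j])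
--         i = j
--     return files
-- ===== Notes on version B (the rewrite author's own statement) =====
-- stated objective: alternative
-- what changed: Replaced A's single accumulating loop with current_file/current_content state by a segment scanner that finds each FILE: marker and slices the block of lines up to the next marker as that file's content.
import Mathlib
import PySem

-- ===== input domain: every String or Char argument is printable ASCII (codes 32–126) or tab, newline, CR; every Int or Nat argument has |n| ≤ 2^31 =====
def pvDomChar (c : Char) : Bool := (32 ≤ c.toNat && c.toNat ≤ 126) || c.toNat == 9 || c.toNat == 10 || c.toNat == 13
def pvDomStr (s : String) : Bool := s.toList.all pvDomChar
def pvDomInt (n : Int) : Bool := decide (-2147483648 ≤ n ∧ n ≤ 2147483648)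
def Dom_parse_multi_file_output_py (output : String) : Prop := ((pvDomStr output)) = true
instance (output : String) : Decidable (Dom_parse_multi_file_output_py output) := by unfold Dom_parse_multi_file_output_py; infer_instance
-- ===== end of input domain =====

-- B replaces A's single accumulating loop (current_file/current_content state) by a
-- segment scanner over marker positions; objective: alternative decomposition, same cost.

-- ===== PORT A =====
-- A's "save current file if truthy" (appears twice in A: inside the loop and at the end)
def pvSave (files : PySem.Dict String String) (cur : Option String) (content : List String) :
    PySem.Dict String String :=
  match cur with
  | some c => if c ≠ "" then files.insert c (PySem.Str.join "\n" content) else files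
  | none => files

def pvStepA (st : PySem.Dict String String × Option String × List String) (line : String) :
    PySem.Dict String String × Option String × List String :=
  let (files, cur, content) := st
  if PySem.Str.startswith line "FILE:" then
    (pvSave files cur content,
     some (PySem.Str.strip (PySem.Str.slice line (some 5) none)), [])
  else
    (files, cur, content ++ [line])

def parse_multi_file_output_py (output : String) : List (String × String) :=
  let st := ((PySem.Str.split? output "\n").getD []).foldl pvStepA (PySem.Dict.empty, none, [])
  (pvSave st.1 st.2.1 st.2.2).items

-- ===== PORT B =====
def pvNotMarker (l : String) : Bool := !(PySem.Str.startswith l "FILE:")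

-- the inner pointer loops of Source B: content = lines until the next marker, rest = from it
def pvAltGo : List String → PySem.Dict String String → PySem.Dict String String
  | [], files => files
  | l :: rest, files =>
      let name := PySem.Str.strip (PySem.Str.slice l (some 5) none)
      let files' := if name ≠ "" then
          files.insert name (PySem.Str.join "\n" (rest.takeWhile pvNotMarker))
        else files
      pvAltGo (rest.dropWhile pvNotMarker) files'
  termination_by ls _ => ls.length
  decreasing_by
    simp only [List.length_cons]
    exact Nat.lt_succ_of_le (List.length_dropWhile_le _ _)

def parse_multi_file_output_py_alt (output : String) : List (String × String) :=
  let lines := (PySem.Str.split? output "\n").getD []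
  (pvAltGo (lines.dropWhile pvNotMarker) PySem.Dict.empty).items

-- ===== PRECONDITION & SPEC =====
def Spec_parse_multi_file_output_py (output : String) (out : List (String × String)) : Prop := out = parse_multi_file_output_py_alt output
instance (output : String) (out : List (String × String)) : Decidable (Spec_parse_multi_file_output_py output out) := by unfold Spec_parse_multi_file_output_py; infer_instance

-- ===== CLAIM (what is proved, stated in full; the proofs are below) =====
def Claim_equal_parse_multi_file_output_py : Prop := ∀ (output : String), Dom_parse_multi_file_output_py output → Spec_parse_multi_file_output_py output (parse_multi_file_output_py output)

-- ===== LEMMAS AND PROOFS =====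

-- Main invariant: for any suffix of lines and any A-state, finalizing A's fold equals
-- B's segment scanner started at the next marker, after saving the pending segment.
lemma pvMain : ∀ (n : Nat) (lines : List String), lines.length ≤ n →
    ∀ (files : PySem.Dict String String) (cur : Option String) (content : List String),
    (fun st : PySem.Dict String String × Option String × List String =>
        pvSave st.1 st.2.1 st.2.2) (lines.foldl pvStepA (files, cur, content))
      = pvAltGo (lines.dropWhile pvNotMarker)
          (pvSave files cur (content ++ lines.takeWhile pvNotMarker)) := by
  intro n
  induction n with
  | zero =>
    intro lines hl files cur content
    have : lines = [] := List.eq_nil_of_length_eq_zero (Nat.le_zero.mp hl)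
    subst this; simp [pvAltGo]
  | succ n ih =>
    intro lines hl files cur content
    cases lines with
    | nil => simp [pvAltGo]
    | cons l rest =>
      have hr : rest.length ≤ n := by
        simpa [Nat.succ_le_succ_iff] using hl
      by_cases hm : PySem.Chars.startswith l.toList ['F','I','L','E',':'] = true
      · -- marker line
        have hnm : pvNotMarker l = false := by simp [pvNotMarker, hm]
        have hstep : pvStepA (files, cur, content) l =
            (pvSave files cur content,
             some (PySem.Str.strip (PySem.Str.slice l (some 5) none)), []) := by
          simp [pvStepA, hm]
        rw [List.foldl_cons, hstep, ih rest hr]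
        rw [List.dropWhile_cons_of_neg (by simp [hnm]),
            List.takeWhile_cons_of_neg (by simp [hnm])]
        simp only [List.nil_append, List.append_nil]
        rw [pvAltGo]
        rfl
      · -- ordinary content line
        have hnm : pvNotMarker l = true := by simp [pvNotMarker, hm]
        have hstep : pvStepA (files, cur, content) l = (files, cur, content ++ [l]) := by
          simp [pvStepA, hm]
        rw [List.foldl_cons, hstep, ih rest hr]
        rw [List.dropWhile_cons_of_pos (by simp [hnm]),
            List.takeWhile_cons_of_pos (by simp [hnm])]
        simp

-- ===== VERDICT (by name: the statement is the Claim_ definition above) =====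
theorem parse_multi_file_output_py_spec : Claim_equal_parse_multi_file_output_py := by
  intro output _
  unfold Spec_parse_multi_file_output_py parse_multi_file_output_py parse_multi_file_output_py_alt
  have h := pvMain ((PySem.Str.split? output "\n").getD []).length ((PySem.Str.split? output "\n").getD [])
      (le_refl _) PySem.Dict.empty none []
  exact congrArg PySem.Dict.items (by simpa [pvSave] using h)
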